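-- pv_equiv track=rewrite | github.com/justinshenk/temporal-awareness | scripts/experiments/patience_degradation.py | _repeat_task_prefix
-- ===== SOURCE A (Python) =====
-- def _repeat_task_prefix(base_prompt: str, n_reps: int) -> str:
--     """
--     Build a prompt simulating n repetitions of a task.
--     The model sees a sequence of repeated similar instructions, then the target.
--     """
--     if n_reps <= 1:
--         return base_prompt
--
--     # Create slight variations of the task to simulate realistic repetition
--     filler_templates = [
--         "Continue with the next item. ",
--         "Proceed to the following task. ",
--         "Moving on to another similar request. ",
--         "Here is another one to process. ",
--         "Next task in the sequence. ",
--         "Please handle the following as well. ",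
--         "Another item requiring attention. ",
--         "Continuing the sequence of tasks. ",
--     ]
--
--     prefix_parts = []
--     for i in range(n_reps - 1):
--         filler = filler_templates[i % len(filler_templates)]
--         prefix_parts.append(filler)
--
--     prefix = "".join(prefix_parts)
--     return prefix + base_prompt
-- ===== SOURCE B (Python) =====
-- def _repeat_task_prefix(base_prompt: str, n_reps: int) -> str:
--     """
--     Build a prompt simulating n repetitions of a task.
--     The model sees a sequence of repeated similar instructions, then the target.
--     """
--     if n_reps <= 1:
--         return base_prompt
--
--     filler_templates = [
--         "Continue with the next item. ",
--         "Proceed to the following task. ",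
--         "Moving on to another similar request. ",
--         "Here is another one to process. ",
--         "Next task in the sequence. ",
--         "Please handle the following as well. ",
--         "Another item requiring attention. ",
--         "Continuing the sequence of tasks. ",
--     ]
--
--     count = n_reps - 1
--     cycles, rem = divmod(count, len(filler_templates))
--     full = "".join(filler_templates)
--     return full * cycles + "".join(filler_templates[:rem]) + base_prompt
-- ===== Notes on version B (the rewrite author's own statement) =====
-- stated objective: alternative
-- what changed: Replaces the per-repetition loop that appends one cyclic filler per index with block arithmetic: divmod(n_reps-1, 8) gives whole cycles done by one string multiplication plus a short remainder join.
import Mathlib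
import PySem

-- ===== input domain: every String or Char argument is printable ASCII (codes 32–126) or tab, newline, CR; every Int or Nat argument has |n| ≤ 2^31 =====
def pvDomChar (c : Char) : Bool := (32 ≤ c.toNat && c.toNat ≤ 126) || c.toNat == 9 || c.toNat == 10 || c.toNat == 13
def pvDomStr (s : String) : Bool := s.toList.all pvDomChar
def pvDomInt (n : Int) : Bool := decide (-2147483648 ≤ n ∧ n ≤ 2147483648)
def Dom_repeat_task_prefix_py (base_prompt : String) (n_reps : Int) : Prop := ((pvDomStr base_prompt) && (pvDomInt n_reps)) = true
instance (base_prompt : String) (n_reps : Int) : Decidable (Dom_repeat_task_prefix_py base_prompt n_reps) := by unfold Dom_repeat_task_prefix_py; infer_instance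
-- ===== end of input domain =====

-- B replaces A's per-repetition append loop with divmod block arithmetic (whole cycles + remainder join); return values proved equal everywhere.

-- the module-level filler template list, shared verbatim by both Pythons
def pvTmpl : List String :=
  [ "Continue with the next item. ",
    "Proceed to the following task. ",
    "Moving on to another similar request. ",
    "Here is another one to process. ",
    "Next task in the sequence. ",
    "Please handle the following as well. ",
    "Another item requiring attention. ",
    "Continuing the sequence of tasks. " ]

-- ===== PORT A =====
def repeat_task_prefix_py (base_prompt : String) (n_reps : Int) : String :=
  if n_reps ≤ 1 then base_prompt
  else
    -- for i in range(n_reps - 1): prefix_parts.append(filler_templates[i % len(filler_templates)])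
    let prefix_parts : List String :=
      (PySem.List.pyRange 0 (n_reps - 1) 1).foldl
        (fun acc i => acc ++ [PySem.List.pyGetD pvTmpl (PySem.Int.mod i (PySem.List.len pvTmpl)) ""]) []
    let pfx := PySem.Str.join "" prefix_parts
    pfx ++ base_prompt

-- ===== PORT B =====
def repeat_task_prefix_py_alt (base_prompt : String) (n_reps : Int) : String :=
  if n_reps ≤ 1 then base_prompt
  else
    let count := n_reps - 1
    -- cycles, rem = divmod(count, len(filler_templates))
    let cycles := PySem.Int.floordiv count (PySem.List.len pvTmpl)
    let rem := PySem.Int.mod count (PySem.List.len pvTmpl)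
    let full := PySem.Str.join "" pvTmpl
    -- full * cycles + "".join(filler_templates[:rem]) + base_prompt
    PySem.Str.join "" (List.replicate cycles.toNat full) ++
      PySem.Str.join "" (pvTmpl.take rem.toNat) ++ base_prompt

-- ===== PRECONDITION & SPEC =====
def Spec_repeat_task_prefix_py (base_prompt : String) (n_reps : Int) (out : String) : Prop := out = repeat_task_prefix_py_alt base_prompt n_reps
instance (base_prompt : String) (n_reps : Int) (out : String) : Decidable (Spec_repeat_task_prefix_py base_prompt n_reps out) := by unfold Spec_repeat_task_prefix_py; infer_instance

-- ===== CLAIM (what is proved, stated in full; the proofs are below) =====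
def Claim_equal_repeat_task_prefix_py : Prop := ∀ (base_prompt : String) (n_reps : Int), Dom_repeat_task_prefix_py base_prompt n_reps → Spec_repeat_task_prefix_py base_prompt n_reps (repeat_task_prefix_py base_prompt n_reps)

-- ===== LEMMAS AND PROOFS =====

theorem pv_intercalate_nil {α : Type} (l : List (List α)) : ([] : List α).intercalate l = l.flatten := by
  induction l with
  | nil => simp [List.intercalate]
  | cons x xs ih =>
    cases xs with
    | nil => simp [List.intercalate, List.intersperse]
    | cons y ys =>
      simp only [List.intercalate, List.intersperse] at *
      simp_all

theorem pv_join_flat (xs : List String) :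
    PySem.Str.join "" xs = String.ofList (xs.map String.toList).flatten := by
  simp [PySem.Str.join, PySem.Chars.join, pv_intercalate_nil]

theorem pv_join_append (a b : List String) :
    PySem.Str.join "" (a ++ b) = PySem.Str.join "" a ++ PySem.Str.join "" b := by
  simp [pv_join_flat]

theorem pv_join_nil : PySem.Str.join "" ([] : List String) = "" := by
  simp [pv_join_flat]

theorem pv_join_singleton (x : String) : PySem.Str.join "" [x] = x := by
  simp [pv_join_flat]

theorem pv_join_take_succ (xs : List String) (r : Nat) (h : r < xs.length) :
    PySem.Str.join "" (xs.take (r + 1)) =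
      PySem.Str.join "" (xs.take r) ++ xs.getD r "" := by
  rw [List.take_add_one, pv_join_append]
  congr 1
  rw [List.getElem?_eq_getElem h, List.getD_eq_getElem?_getD, List.getElem?_eq_getElem h]
  simp [pv_join_singleton]

-- the heart: the loop's joined parts equal the block-arithmetic form
theorem pv_parts (c : Nat) :
    PySem.Str.join "" ((List.range c).map (fun k => pvTmpl.getD (k % 8) "")) =
      PySem.Str.join "" (List.replicate (c / 8) (PySem.Str.join "" pvTmpl)) ++
        PySem.Str.join "" (pvTmpl.take (c % 8)) := by
  have hlen : pvTmpl.length = 8 := by decide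
  induction c with
  | zero => simp [pv_join_nil]
  | succ c ih =>
    rw [List.range_succ, List.map_append, pv_join_append, ih, List.map_singleton,
        pv_join_singleton]
    by_cases h7 : c % 8 = 7
    · have hq : (c + 1) / 8 = c / 8 + 1 := by omega
      have hr : (c + 1) % 8 = 0 := by omega
      rw [hq, hr, List.take_zero, pv_join_nil, List.replicate_succ', pv_join_append,
          pv_join_singleton, String.append_empty, h7, String.append_assoc]
      have h78 : PySem.Str.join "" (pvTmpl.take 7) ++ pvTmpl.getD 7 "" = PySem.Str.join "" pvTmpl := by
        rw [← pv_join_take_succ pvTmpl 7 (by omega)]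
        rw [show (7 + 1 : Nat) = 8 from rfl, ← hlen, List.take_length]
      rw [h78]
    · have hq : (c + 1) / 8 = c / 8 := by omega
      have hr : (c + 1) % 8 = c % 8 + 1 := by omega
      rw [hq, hr, String.append_assoc, pv_join_take_succ pvTmpl (c % 8) (by omega)]

-- ===== VERDICT (by name: the statement is the Claim_ definition above) =====
theorem repeat_task_prefix_py_spec : Claim_equal_repeat_task_prefix_py := by
  intro b n _
  unfold Spec_repeat_task_prefix_py repeat_task_prefix_py repeat_task_prefix_py_alt
  by_cases h : n ≤ 1
  · simp [h]
  · simp only [h, if_false]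
    set c : Nat := (n - 1).toNat with hc
    have hcast : n - 1 = (c : Int) := by omega
    rw [hcast]
    have hlen : PySem.List.len pvTmpl = (8 : Int) := by decide
    have hfold :
        (PySem.List.pyRange 0 ((c : Int)) 1).foldl
          (fun acc i => acc ++ [PySem.List.pyGetD pvTmpl (PySem.Int.mod i (PySem.List.len pvTmpl)) ""]) [] =
          (List.range c).map (fun k => pvTmpl.getD (k % 8) "") := by
      rw [PySem.List.foldl_append_singleton_eq_map, List.nil_append, PySem.List.pyRange_one]
      have ht : (((c : Int)) - 0).toNat = c := by omega
      rw [ht, List.map_map]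
      apply List.map_congr_left
      intro k hk
      simp only [Function.comp, zero_add]
      rw [hlen, show ((8:Int)) = ((8:Nat):Int) by norm_num, PySem.Int.mod_natCast,
          PySem.List.pyGetD_natCast]
    rw [hfold, pv_parts c]
    have hdiv : (PySem.Int.floordiv ((c : Int)) (PySem.List.len pvTmpl)).toNat = c / 8 := by
      rw [hlen, PySem.Int.floordiv_eq_ediv_of_pos (by norm_num)]
      omega
    have hmod : (PySem.Int.mod ((c : Int)) (PySem.List.len pvTmpl)).toNat = c % 8 := by
      rw [hlen, PySem.Int.mod_eq_emod_of_pos (by norm_num)]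
      omega
    rw [hdiv, hmod, String.append_assoc]
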